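-- pv_equiv track=rewrite | github.com/Blackwidow8/LEARN-PYTHON | WEEK2/palindrome2.py | find_palindromes_in_text
-- ===== SOURCE A (Python) =====
-- def find_palindromes_in_text(text):
--     normalized_text = ''.join(c for c in text.lower() if c.isalnum() or c.isspace()).split()
--     palindromes = []
--
--     def is_palindrome_seq(words_seq):
--         seq = ''.join(words_seq)
--         return seq == seq[::-1]
--
--     for start_idx in range(len(normalized_text)):
--         for end_idx in range(start_idx + 1, len(normalized_text) + 1):
--             word_sequence = normalized_text[start_idx:end_idx]
--             if is_palindrome_seq(word_sequence) and len(word_sequence) > 1: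
--                 palindrome_phrase = ' '.join(word_sequence)
--                 if palindrome_phrase not in palindromes:
--                     palindromes.append(palindrome_phrase)
--
--     return palindromes
-- ===== SOURCE B (Python) =====
-- def find_palindromes_in_text(text):
--     # Normalize with a C-level translate (delete every non-alnum, non-space char)
--     # instead of a per-character generator join; then find the palindromic phrases
--     # with one incremental concatenation/phrase per start index and a set for dedup.
--     lowered = text.lower()
--     delete = {ord(c): None for c in set(lowered) if not (c.isalnum() or c.isspace())}
--     words = lowered.translate(delete).split()
--     seen = set()
--     out = []
--     for i in range(len(words)):
--         seq = words[i]
--         phrase = words[i]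
--         for w in words[i + 1:]:
--             seq += w
--             phrase += ' ' + w
--             if seq == seq[::-1] and phrase not in seen:
--                 seen.add(phrase)
--                 out.append(phrase)
--     return out
-- ===== Notes on version B (the rewrite author's own statement) =====
-- stated objective: faster
-- what changed: B normalizes via a C-level str.translate deletion table built from the distinct characters instead of a per-character generator join, and finds the phrases with one incremental running concatenation and running phrase per start index plus a set for dedup, instead of re-slicing/re-joining the word list for every (start,end) pair and scanning the output list for duplicates.
import Mathlib
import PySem

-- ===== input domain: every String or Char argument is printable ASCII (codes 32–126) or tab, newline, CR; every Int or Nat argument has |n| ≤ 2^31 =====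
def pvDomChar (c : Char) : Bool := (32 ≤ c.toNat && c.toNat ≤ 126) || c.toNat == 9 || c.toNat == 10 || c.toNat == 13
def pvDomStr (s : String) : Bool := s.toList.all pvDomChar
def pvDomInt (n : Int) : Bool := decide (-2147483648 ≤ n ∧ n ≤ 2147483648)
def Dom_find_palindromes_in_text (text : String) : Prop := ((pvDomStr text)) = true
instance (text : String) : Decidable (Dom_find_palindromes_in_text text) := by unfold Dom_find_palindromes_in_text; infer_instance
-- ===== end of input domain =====

-- B normalizes with a translate deletion table and replaces A's per-pair slice+join and
-- list-membership scans by one incremental concatenation/phrase per start index and a set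
-- for dedup (objective: faster, constant factor; measured).

-- ===== PORT A =====
-- A's normalization line:
-- ''.join(c for c in text.lower() if c.isalnum() or c.isspace()).split()
def pvNormWords (text : String) : List String :=
  PySem.Str.split₀ (String.ofList
    (((PySem.Str.lower text).toList).filter (fun c => PySem.Chars.isalnum c || PySem.Chars.isspace c)))

-- Python A's nested helper is_palindrome_seq; seq[::-1] is reversal (PySem.List.slice?_none_none_neg_one)
def pvIsPalSeq (words_seq : List (List Char)) : Bool :=
  let seq := PySem.Chars.join [] words_seq
  seq == seq.reverse

-- body of A's inner loop (one end_idx)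
def pvInnerA (ws : List String) (pal : List String) (s e : Int) : List String :=
  let word_sequence := PySem.List.slice ws (some s) (some e)
  if pvIsPalSeq (word_sequence.map String.toList) && decide (1 < word_sequence.length) then
    let phrase := String.ofList (PySem.Chars.join [' '] (word_sequence.map String.toList))
    if !(pal.contains phrase) then pal ++ [phrase] else pal
  else pal

-- body of A's outer loop (one start_idx)
def pvOuterA (ws : List String) (pal : List String) (s : Int) : List String :=
  (PySem.List.pyRange (s + 1) ((ws.length : Int) + 1)).foldl (fun p e => pvInnerA ws p s e) pal

def find_palindromes_in_text (text : String) : List String :=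
  let normalized := pvNormWords text
  (PySem.List.pyRange 0 (normalized.length : Int)).foldl (fun pal s => pvOuterA normalized pal s) []

-- ===== PORT B =====
-- B's normalization: lowered.translate({ord(c): None for c in set(lowered) if not pred(c)}).split().
-- Hand-ported: the all-None translate table is used only for deletion, so it is modelled by its
-- key list (ord of each distinct failing char, in set-insertion order); translate deletes exactly
-- the characters whose ord is a key — exact on every input.
def pvNormWordsB (text : String) : List String :=
  let lowered := PySem.Str.lower text
  let delete : List Int :=
    ((PySem.Set.ofList lowered.toList).filter
        (fun c => !(PySem.Chars.isalnum c || PySem.Chars.isspace c))).map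
      (fun c => ((c.toNat : Int)))
  PySem.Str.split₀ (String.ofList
    (lowered.toList.filter (fun c => !(delete.contains ((c.toNat : Int))))))

-- body of B's inner loop: state ((seq, phrase), (seen, out)), one word w
def pvInnerB (st : (List Char × List Char) × (PySem.Set String × List String)) (w : String) :
    (List Char × List Char) × (PySem.Set String × List String) :=
  let seq := st.1.1 ++ w.toList
  let phrase := st.1.2 ++ ' ' :: w.toList     -- phrase + ' ' + w
  if (seq == seq.reverse) && !(PySem.Set.contains st.2.1 (String.ofList phrase)) then
    ((seq, phrase), (PySem.Set.add st.2.1 (String.ofList phrase), st.2.2 ++ [String.ofList phrase]))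
  else
    ((seq, phrase), st.2)

-- body of B's outer loop (one i): seq = phrase = words[i], then fold over words[i+1:]
def pvOuterB (ws : List String) (st : PySem.Set String × List String) (i : Int) :
    PySem.Set String × List String :=
  let wi := (PySem.List.pyGet? ws i).getD ""    -- words[i]; i is always in range here
  ((PySem.List.slice ws (some (i + 1)) none).foldl pvInnerB ((wi.toList, wi.toList), st)).2

def find_palindromes_in_text_alt (text : String) : List String :=
  let words := pvNormWordsB text
  ((PySem.List.pyRange 0 (words.length : Int)).foldl (pvOuterB words) (PySem.Set.empty, [])).2

-- ===== PRECONDITION & SPEC =====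
def Spec_find_palindromes_in_text (text : String) (out : List String) : Prop := out = find_palindromes_in_text_alt text
instance (text : String) (out : List String) : Decidable (Spec_find_palindromes_in_text text out) := by unfold Spec_find_palindromes_in_text; infer_instance

-- ===== CLAIM (what is proved, stated in full; the proofs are below) =====
def Claim_equal_find_palindromes_in_text : Prop := ∀ (text : String), Dom_find_palindromes_in_text text → Spec_find_palindromes_in_text text (find_palindromes_in_text text)

-- ===== LEMMAS AND PROOFS =====

-- the concatenation / the space-joined phrase of words[s:e]
def pvSeqOf (ws : List String) (s e : Nat) : List Char :=
  PySem.Chars.join [] ((PySem.List.slice ws (some (s : Int)) (some (e : Int))).map String.toList)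
def pvPhrOf (ws : List String) (s e : Nat) : List Char :=
  PySem.Chars.join [' '] ((PySem.List.slice ws (some (s : Int)) (some (e : Int))).map String.toList)

lemma pv_join_snoc (sep : List Char) (xss : List (List Char)) (y : List Char) (h : xss ≠ []) :
    PySem.Chars.join sep (xss ++ [y]) = PySem.Chars.join sep xss ++ sep ++ y := by
  induction xss with
  | nil => cases h rfl
  | cons p rest ih =>
    cases rest with
    | nil => simp [PySem.Chars.join_cons_cons, PySem.Chars.join_singleton]
    | cons q r =>
      have ih' := ih (by simp)
      simp only [List.cons_append] at ih' ⊢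
      rw [PySem.Chars.join_cons_cons, PySem.Chars.join_cons_cons, ih']
      simp

lemma pv_slice_snoc (ws : List String) (s e : Nat) (hse : s ≤ e) (hen : e < ws.length) :
    PySem.List.slice ws (some ((s : Int))) (some ((e + 1 : Nat) : Int)) =
      PySem.List.slice ws (some (s : Int)) (some (e : Int)) ++ [ws[e]] := by
  rw [PySem.List.slice_natCast, PySem.List.slice_natCast]
  have h1 : e + 1 - s = (e - s) + 1 := by omega
  rw [h1, List.take_add_one]
  congr 1
  have hlt : e - s < (ws.drop s).length := by simp [List.length_drop]; omega
  rw [List.getElem?_eq_getElem hlt]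
  simp [List.getElem_drop]
  congr 1
  omega

lemma pv_slice_len (ws : List String) (s e : Nat) (_hse : s ≤ e) (hen : e ≤ ws.length) :
    (PySem.List.slice ws (some (s : Int)) (some (e : Int))).length = e - s := by
  rw [PySem.List.slice_natCast]
  simp [List.length_take, List.length_drop]
  omega

lemma pv_slice_one (ws : List String) (s : Nat) (hs : s < ws.length) :
    PySem.List.slice ws (some (s : Int)) (some ((s + 1 : Nat) : Int)) = [ws[s]] := by
  have := pv_slice_snoc ws s s le_rfl hs
  rw [this, PySem.List.slice_natCast]
  simp

lemma pvSeqOf_succ (ws : List String) (s e : Nat) (hse : s < e) (hen : e < ws.length) :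
    pvSeqOf ws s (e + 1) = pvSeqOf ws s e ++ (ws[e]).toList := by
  unfold pvSeqOf
  rw [pv_slice_snoc ws s e (le_of_lt hse) hen, List.map_append]
  simp only [List.map_cons, List.map_nil]
  rw [pv_join_snoc _ _ _ (by
    intro hnil
    have hl := pv_slice_len ws s e (le_of_lt hse) (le_of_lt hen)
    rw [List.map_eq_nil_iff] at hnil
    rw [hnil] at hl
    simp at hl
    omega)]
  simp

lemma pvPhrOf_succ (ws : List String) (s e : Nat) (hse : s < e) (hen : e < ws.length) :
    pvPhrOf ws s (e + 1) = pvPhrOf ws s e ++ ' ' :: (ws[e]).toList := by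
  unfold pvPhrOf
  rw [pv_slice_snoc ws s e (le_of_lt hse) hen, List.map_append]
  simp only [List.map_cons, List.map_nil]
  rw [pv_join_snoc _ _ _ (by
    intro hnil
    have hl := pv_slice_len ws s e (le_of_lt hse) (le_of_lt hen)
    rw [List.map_eq_nil_iff] at hnil
    rw [hnil] at hl
    simp at hl
    omega)]
  simp

-- rfl bridges from the port's terms to pvSeqOf/pvPhrOf
lemma pvSeqOf_def (ws : List String) (s e : Nat) :
    PySem.Chars.join [] ((PySem.List.slice ws (some (s : Int)) (some (e : Int))).map String.toList) = pvSeqOf ws s e := rfl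
lemma pvPhrOf_def (ws : List String) (s e : Nat) :
    PySem.Chars.join [' '] ((PySem.List.slice ws (some (s : Int)) (some (e : Int))).map String.toList) = pvPhrOf ws s e := rfl

lemma pv_pyRange_nil (a : Int) : PySem.List.pyRange a a = [] := by
  apply List.eq_nil_iff_forall_not_mem.mpr
  intro i hi
  have := (PySem.List.mem_pyRange_one).mp hi
  omega

-- one synchronous step of the two inner loops
lemma pvStep_eq (ws : List String) (s e0 : Nat) (h1 : s + 1 ≤ e0) (hlt : e0 < ws.length)
    (pal : List String) :
    pvInnerB ((pvSeqOf ws s e0, pvPhrOf ws s e0), (pal, pal)) ws[e0] =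
      ((pvSeqOf ws s (e0 + 1), pvPhrOf ws s (e0 + 1)),
       (pvInnerA ws pal ((s : Nat) : Int) ((e0 + 1 : Nat) : Int),
        pvInnerA ws pal ((s : Nat) : Int) ((e0 + 1 : Nat) : Int))) := by
  have hseq : pvSeqOf ws s e0 ++ (ws[e0]).toList = pvSeqOf ws s (e0 + 1) :=
    (pvSeqOf_succ ws s e0 (by omega) hlt).symm
  have hphr : pvPhrOf ws s e0 ++ ' ' :: (ws[e0]).toList = pvPhrOf ws s (e0 + 1) :=
    (pvPhrOf_succ ws s e0 (by omega) hlt).symm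
  simp only [pvInnerB, pvInnerA, pvIsPalSeq, pvSeqOf_def, pvPhrOf_def, hseq, hphr,
    PySem.Set.contains]
  rw [pv_slice_len ws s (e0 + 1) (by omega) (by omega),
    decide_eq_true (show 1 < e0 + 1 - s by omega), Bool.and_true]
  cases hcc : (pvSeqOf ws s (e0 + 1) == (pvSeqOf ws s (e0 + 1)).reverse) with
  | false => simp
  | true =>
    simp only [Bool.true_and, if_true]
    cases hm : pal.contains (String.ofList (pvPhrOf ws s (e0 + 1))) with
    | true => simp
    | false =>
      have hnot : String.ofList (pvPhrOf ws s (e0 + 1)) ∉ pal := by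
        intro hmem
        rw [List.contains_iff_mem.mpr hmem] at hm
        cases hm
      simp [hnot, PySem.Set.add, PySem.Set.contains]

-- the two inner loops stay in lock-step from any synchronised state
lemma pvInner_eq (ws : List String) (s : Nat) :
    ∀ (rest : List String) (e0 : Nat), rest = ws.drop e0 → s + 1 ≤ e0 → e0 ≤ ws.length →
    ∀ (pal : List String),
      (rest.foldl pvInnerB ((pvSeqOf ws s e0, pvPhrOf ws s e0), (pal, pal))).2 =
        (let q := (PySem.List.pyRange ((e0 + 1 : Nat) : Int) ((ws.length + 1 : Nat) : Int)).foldl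
            (fun p e => pvInnerA ws p (s : Int) e) pal
         (q, q)) := by
  intro rest
  induction rest with
  | nil =>
    intro e0 hrest h1 h2 pal
    have he : e0 = ws.length := by
      have := congrArg List.length hrest
      simp at this
      omega
    subst he
    rw [pv_pyRange_nil]
    simp
  | cons w rest' ih =>
    intro e0 hrest h1 h2 pal
    have hlt : e0 < ws.length := by
      by_contra h
      rw [List.drop_eq_nil_of_le (by omega)] at hrest
      simp at hrest
    have hwr : w :: rest' = ws[e0] :: ws.drop (e0 + 1) := by
      rw [hrest, List.drop_eq_getElem_cons hlt]
    have hw : w = ws[e0] := (List.cons.injEq _ _ _ _ ▸ hwr).1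
    have hrest' : rest' = ws.drop (e0 + 1) := (List.cons.injEq _ _ _ _ ▸ hwr).2
    have hApeel : PySem.List.pyRange ((e0 + 1 : Nat) : Int) ((ws.length + 1 : Nat) : Int) =
        ((e0 + 1 : Nat) : Int) :: PySem.List.pyRange ((e0 + 2 : Nat) : Int) ((ws.length + 1 : Nat) : Int) := by
      rw [PySem.List.pyRange_one_cons
        (show ((e0 + 1 : Nat) : Int) < ((ws.length + 1 : Nat) : Int) by exact_mod_cast Nat.succ_lt_succ hlt)]
      norm_cast
    rw [List.foldl_cons, hw, pvStep_eq ws s e0 h1 hlt pal, hApeel, List.foldl_cons]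
    simpa using ih (e0 + 1) hrest' (by omega) (by omega) _

-- one outer iteration
lemma pvOuter_eq (ws : List String) (s : Nat) (hs : s < ws.length) (pal : List String) :
    pvOuterB ws (pal, pal) ((s : Nat) : Int) = (pvOuterA ws pal ((s : Nat) : Int), pvOuterA ws pal ((s : Nat) : Int)) := by
  have hw : (PySem.List.pyGet? ws ((s : Nat) : Int)).getD "" = ws[s] := by
    rw [PySem.List.pyGet?_natCast, List.getElem?_eq_getElem hs]
    rfl
  have hdrop : PySem.List.slice ws (some (((s : Nat) : Int) + 1)) none = ws.drop (s + 1) := by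
    have e1 : (((s : Nat) : Int) + 1) = ((s + 1 : Nat) : Int) := by push_cast; ring
    rw [e1, PySem.List.slice_from ws (by exact_mod_cast Nat.zero_le (s + 1))]
    simp
  have hinit : (ws[s]).toList = pvSeqOf ws s (s + 1) := by
    unfold pvSeqOf
    rw [pv_slice_one ws s hs]
    simp [PySem.Chars.join_singleton]
  have hinit' : (ws[s]).toList = pvPhrOf ws s (s + 1) := by
    unfold pvPhrOf
    rw [pv_slice_one ws s hs]
    simp [PySem.Chars.join_singleton]
  have hApeel : PySem.List.pyRange (((s : Nat) : Int) + 1) ((ws.length : Int) + 1) =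
      ((s + 1 : Nat) : Int) :: PySem.List.pyRange ((s + 2 : Nat) : Int) ((ws.length + 1 : Nat) : Int) := by
    have e1 : (((s : Nat) : Int) + 1) = ((s + 1 : Nat) : Int) := by push_cast; ring
    have e2 : ((ws.length : Int) + 1) = ((ws.length + 1 : Nat) : Int) := by push_cast; ring
    rw [e1, e2, PySem.List.pyRange_one_cons
      (show ((s + 1 : Nat) : Int) < ((ws.length + 1 : Nat) : Int) by exact_mod_cast Nat.succ_lt_succ hs)]
    norm_cast
  have hfirst : pvInnerA ws pal ((s : Nat) : Int) ((s + 1 : Nat) : Int) = pal := by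
    simp only [pvInnerA]
    rw [pv_slice_len ws s (s + 1) (by omega) (by omega),
      decide_eq_false (show ¬ (1 < s + 1 - s) by omega), Bool.and_false]
    simp
  simp only [pvOuterB, pvOuterA, hw, hdrop, hApeel, List.foldl_cons, hfirst]
  rw [show ((ws[s]).toList, (ws[s]).toList) = (pvSeqOf ws s (s + 1), pvPhrOf ws s (s + 1)) from by
    rw [← hinit, ← hinit']]
  simpa using pvInner_eq ws s (ws.drop (s + 1)) (s + 1) rfl (by omega) (by omega) pal

lemma pvFold_eq (ws : List String) :
    ∀ (l : List Int), (∀ i ∈ l, ∃ k : Nat, i = (k : Int) ∧ k < ws.length) → ∀ (pal : List String),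
      l.foldl (pvOuterB ws) (pal, pal) =
        (l.foldl (fun p i => pvOuterA ws p i) pal, l.foldl (fun p i => pvOuterA ws p i) pal) := by
  intro l
  induction l with
  | nil => intro _ pal; simp
  | cons i t ih =>
    intro hmem pal
    obtain ⟨k, hk, hklt⟩ := hmem i (by simp)
    subst hk
    rw [List.foldl_cons, List.foldl_cons, pvOuter_eq ws k hklt pal]
    exact ih (fun j hj => hmem j (by simp [hj])) _

-- the translate-table normalization computes A's filter
lemma pvNorm_eq (text : String) : pvNormWordsB text = pvNormWords text := by
  simp only [pvNormWordsB, pvNormWords]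
  refine congrArg _ (congrArg _ ?_)
  apply List.filter_congr
  intro c hc
  by_cases hp : (PySem.Chars.isalnum c || PySem.Chars.isspace c) = true
  · have hnotmem : ((c.toNat : Int)) ∉
        ((PySem.Set.ofList (PySem.Str.lower text).toList).filter
          (fun d => !(PySem.Chars.isalnum d || PySem.Chars.isspace d))).map
        (fun d => ((d.toNat : Int))) := by
      intro hmem
      obtain ⟨d, hd, hde⟩ := List.mem_map.mp hmem
      have hdc : d = c := Char.ext (UInt32.toNat_inj.mp (Nat.cast_inj.mp hde))
      subst hdc
      have := (List.mem_filter.mp hd).2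
      rw [hp] at this
      simp at this
    have hcont : (((PySem.Set.ofList (PySem.Str.lower text).toList).filter
          (fun d => !(PySem.Chars.isalnum d || PySem.Chars.isspace d))).map
        (fun d => ((d.toNat : Int)))).contains ((c.toNat : Int)) = false := by
      rw [Bool.eq_false_iff]
      intro hcont
      exact hnotmem (List.contains_iff_mem.mp hcont)
    rw [hcont, hp]
    rfl
  · have hmem : ((c.toNat : Int)) ∈
        ((PySem.Set.ofList (PySem.Str.lower text).toList).filter
          (fun d => !(PySem.Chars.isalnum d || PySem.Chars.isspace d))).map
        (fun d => ((d.toNat : Int))) :=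
      List.mem_map.mpr ⟨c, List.mem_filter.mpr
        ⟨(PySem.Set.mem_ofList _ _).mpr hc, by rw [Bool.eq_false_iff.mpr hp]; rfl⟩, rfl⟩
    rw [List.contains_iff_mem.mpr hmem, Bool.eq_false_iff.mpr hp]
    rfl

theorem find_palindromes_in_text_spec : Claim_equal_find_palindromes_in_text := by
  intro text _
  unfold Spec_find_palindromes_in_text
  show find_palindromes_in_text text = find_palindromes_in_text_alt text
  simp only [find_palindromes_in_text, find_palindromes_in_text_alt, pvNorm_eq]
  have hmem : ∀ i ∈ PySem.List.pyRange 0 ((pvNormWords text).length : Int),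
      ∃ k : Nat, i = (k : Int) ∧ k < (pvNormWords text).length := by
    intro i hi
    rw [PySem.List.pyRange_zero_natCast] at hi
    obtain ⟨k, hk, hki⟩ := List.mem_map.mp hi
    exact ⟨k, hki.symm, List.mem_range.mp hk⟩
  rw [show (PySem.Set.empty : PySem.Set String) = ([] : List String) from rfl,
    pvFold_eq (pvNormWords text) _ hmem []]
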